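-- pv_equiv track=rewrite | github.com/inmicro/solving-google-foobar | Challenge-1-Braille-Translation/solution.py | solution
-- ===== SOURCE A (Python) =====
-- braille_map = {
-- 	'a' : '100000',
-- 	'b' : '110000',
-- 	'c' : '100100',
-- 	'd' : '100110',
-- 	'e' : '100010',
-- 	'f' : '110100',
-- 	'g' : '110110',
-- 	'h' : '110010',
-- 	'i' : '010100',
-- 	'j' : '010110',
-- 	'k' : '101000',
-- 	'l' : '111000',
-- 	'm' : '101100',
-- 	'n' : '101110',
-- 	'o' : '101010',
-- 	'p' : '111100',
-- 	'q' : '111110',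
-- 	'r' : '111010',
-- 	's' : '011100',
-- 	't' : '011110',
-- 	'u' : '101001',
-- 	'v' : '111001',
-- 	'w' : '010111',
-- 	'x' : '101101',
-- 	'y' : '101111',
-- 	'z' : '101011',
-- }
--
-- capital_mark = '000001'
--
-- blank_mark = '000000'
--
-- def solution(s):
--     # Your code here
-- 	c = 1
-- 	final_string = ''
-- 	for word in s.split():
-- 		for letter in word:
-- 			l = letter.lower()
-- 			if l in braille_map:
-- 				if letter.isupper():
-- 					final_string += capital_mark
-- 					final_string += braille_map[l]
-- 				else:
-- 					final_string += braille_map[letter]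
-- 		if len(s.split()) > 1 and c != len(s.split()):
-- 			final_string += blank_mark
-- 			c += 1
--
--
-- 	return final_string
-- ===== SOURCE B (Python) =====
-- braille_map = {
--     'a': '100000', 'b': '110000', 'c': '100100', 'd': '100110', 'e': '100010',
--     'f': '110100', 'g': '110110', 'h': '110010', 'i': '010100', 'j': '010110',
--     'k': '101000', 'l': '111000', 'm': '101100', 'n': '101110', 'o': '101010',
--     'p': '111100', 'q': '111110', 'r': '111010', 's': '011100', 't': '011110',
--     'u': '101001', 'v': '111001', 'w': '010111', 'x': '101101', 'y': '101111',
--     'z': '101011',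
-- }
--
-- capital_mark = '000001'
--
-- blank_mark = '000000'
--
--
-- def solution(s):
--     # single pass over the raw string: no split(), no word list.
--     # 'started' = a word has begun earlier; 'pending' = a separator is owed
--     # before the next word's cells.
--     out = []
--     pending = False
--     started = False
--     for ch in s:
--         if ch.isspace():
--             pending = started
--         else:
--             if pending:
--                 out.append(blank_mark)
--                 pending = False
--             started = True
--             l = ch.lower()
--             if l in braille_map:
--                 if ch.isupper():
--                     out.append(capital_mark)
--                 out.append(braille_map[l])
--     return ''.join(out)
-- ===== Notes on version B (the rewrite author's own statement) =====
-- stated objective: alternative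
-- what changed: B replaces A's split()-into-words loop with separator counter (and per-word recomputation of len(s.split())) by a single left-to-right pass over the raw string: a two-flag state machine (started/pending) that emits an owed blank_mark when the next word begins, never building the word list at all.
import Mathlib
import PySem

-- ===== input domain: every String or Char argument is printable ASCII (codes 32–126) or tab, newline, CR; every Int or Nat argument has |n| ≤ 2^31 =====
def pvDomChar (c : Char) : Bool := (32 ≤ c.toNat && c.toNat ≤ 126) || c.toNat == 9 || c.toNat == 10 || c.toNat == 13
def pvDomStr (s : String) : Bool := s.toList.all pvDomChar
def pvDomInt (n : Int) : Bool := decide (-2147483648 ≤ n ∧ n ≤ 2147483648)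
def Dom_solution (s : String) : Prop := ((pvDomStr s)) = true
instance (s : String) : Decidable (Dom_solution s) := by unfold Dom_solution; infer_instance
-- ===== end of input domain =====

-- B replaces A's split()-into-words loop with separator counter by a single pass over the
-- raw string: a two-flag state machine emitting an owed blank_mark when a new word begins
-- (objective: alternative).

-- shared module-level data: braille_map / capital_mark / blank_mark
def brailleMap : Char → Option String
  | 'a' => some "100000" | 'b' => some "110000" | 'c' => some "100100"
  | 'd' => some "100110" | 'e' => some "100010" | 'f' => some "110100"
  | 'g' => some "110110" | 'h' => some "110010" | 'i' => some "010100"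
  | 'j' => some "010110" | 'k' => some "101000" | 'l' => some "111000"
  | 'm' => some "101100" | 'n' => some "101110" | 'o' => some "101010"
  | 'p' => some "111100" | 'q' => some "111110" | 'r' => some "111010"
  | 's' => some "011100" | 't' => some "011110" | 'u' => some "101001"
  | 'v' => some "111001" | 'w' => some "010111" | 'x' => some "101101"
  | 'y' => some "101111" | 'z' => some "101011"
  | _ => none

def capitalMark : String := "000001"
def blankMark : String := "000000"

-- ===== PORT A =====
-- inner loop body: one letter of a word appended to final_string
def stepLetterA (fs : String) (letter : Char) : String :=
  let l := PySem.Chars.lowerChar letter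
  match brailleMap l with
  | some code =>
      if PySem.Chars.isupper letter then fs ++ capitalMark ++ code
      -- else branch is braille_map[letter]; KeyError is unreachable here because
      -- isupper letter = false ∧ lower letter ∈ map force letter to be a lowercase key
      else fs ++ (brailleMap letter).getD ""
  | none => fs

-- outer loop body: one word; n = len(s.split()), state = (c, final_string)
def stepWordA (n : Nat) (st : Nat × String) (word : String) : Nat × String :=
  let fs := word.toList.foldl stepLetterA st.2
  if n > 1 && st.1 != n then (st.1 + 1, fs ++ blankMark) else (st.1, fs)

def solution (s : String) : String :=
  ((PySem.Str.split₀ s).foldl (stepWordA (PySem.Str.split₀ s).length) (1, "")).2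

-- ===== PORT B =====
-- loop body of B's state machine; state = (out, pending, started)
def stepB (st : List String × Bool × Bool) (ch : Char) : List String × Bool × Bool :=
  if PySem.Chars.isspace ch then (st.1, st.2.2, st.2.2)
  else
    let out := if st.2.1 then st.1 ++ [blankMark] else st.1
    let l := PySem.Chars.lowerChar ch
    match brailleMap l with
    | some code =>
        ((if PySem.Chars.isupper ch then out ++ [capitalMark] else out) ++ [code], false, true)
    | none => (out, false, true)

def solution_alt (s : String) : String :=
  PySem.Str.join "" ((s.toList.foldl stepB ([], false, false)).1)

-- ===== PRECONDITION & SPEC =====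
def Spec_solution (s : String) (out : String) : Prop := out = solution_alt s
instance (s : String) (out : String) : Decidable (Spec_solution s out) := by unfold Spec_solution; infer_instance

-- ===== CLAIM (what is proved, stated in full; the proofs are below) =====
def Claim_equal_solution : Prop := ∀ (s : String), Dom_solution s → Spec_solution s (solution s)

-- ===== LEMMAS AND PROOFS =====

-- the braille cells of one character, as a list of chars (proof-side characterisation)
def wc (c : Char) : List Char :=
  match brailleMap (PySem.Chars.lowerChar c) with
  | some code => (if PySem.Chars.isupper c then capitalMark.toList else []) ++ code.toList
  | none => []

-- cells of one word, and the joined cells of a word list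
def tw (w : List Char) : List Char := (w.map wc).flatten
def jn (ps : List (List Char)) : List Char := PySem.Chars.join blankMark.toList (ps.map tw)

-- reference form of B's state machine (output chars only; pending, started)
def smRef : List Char → Bool → Bool → List Char
  | [], _, _ => []
  | c :: rest, p, st =>
    if PySem.Chars.isspace c then smRef rest st st
    else (if p then blankMark.toList else []) ++ wc c ++ smRef rest false true

theorem lowerChar_of_not_upper {c : Char} (h : PySem.Chars.isupper c = false) :
    PySem.Chars.lowerChar c = c := by
  simp [PySem.Chars.lowerChar, h]

theorem stepLetterA_eq (fs : String) (c : Char) :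
    (stepLetterA fs c).toList = fs.toList ++ wc c := by
  unfold stepLetterA wc
  cases hm : brailleMap (PySem.Chars.lowerChar c) with
  | none => simp [hm]
  | some code =>
      cases hu : PySem.Chars.isupper c with
      | true => simp [hm]
      | false =>
          have hm' : brailleMap c = some code := by
            rw [← lowerChar_of_not_upper hu]; exact hm
          simp [hm, hm']

theorem foldA_inner (cs : List Char) : ∀ fs : String,
    (cs.foldl stepLetterA fs).toList = fs.toList ++ tw cs := by
  induction cs with
  | nil => simp [tw]
  | cons c cs ih =>
      intro fs
      rw [List.foldl_cons, ih, stepLetterA_eq]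
      simp [tw]

theorem join_empty_sep (parts : List (List Char)) :
    PySem.Chars.join [] parts = parts.flatten := by
  induction parts with
  | nil => simp [PySem.Chars.join_nil]
  | cons p rest ih =>
      cases rest with
      | nil => simp [PySem.Chars.join_singleton]
      | cons q r => simp [PySem.Chars.join_cons_cons, ih]

-- ----- characterising split₀.go -----

theorem go_acc (cs : List Char) : ∀ cur acc,
    PySem.Chars.split₀.go cs cur acc = acc.reverse ++ PySem.Chars.split₀.go cs cur [] := by
  induction cs with
  | nil =>
      intro cur acc
      by_cases h : cur.isEmpty = true <;> simp [PySem.Chars.split₀.go, h]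
  | cons c rest ih =>
      intro cur acc
      by_cases hs : PySem.Chars.isspace c = true
      · by_cases h : cur.isEmpty = true
        · simp only [PySem.Chars.split₀.go, hs, h, if_true]
          exact ih [] acc
        · simp only [PySem.Chars.split₀.go, hs, h, if_true, if_false, Bool.false_eq_true]
          rw [ih [] (cur.reverse :: acc), ih [] [cur.reverse]]
          simp
      · simp [PySem.Chars.split₀.go, hs, ih (c :: cur) acc]

theorem go_ne_nil (cs : List Char) : ∀ cur, cur ≠ [] →
    PySem.Chars.split₀.go cs cur [] ≠ [] := by
  induction cs with
  | nil =>
      intro cur h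
      have : cur.isEmpty = false := by simpa [List.isEmpty_iff] using h
      simp [PySem.Chars.split₀.go, this]
  | cons c rest ih =>
      intro cur h
      have hne : cur.isEmpty = false := by simpa [List.isEmpty_iff] using h
      by_cases hs : PySem.Chars.isspace c = true
      · simp only [PySem.Chars.split₀.go, hs, hne, if_true, Bool.false_eq_true, if_false]
        rw [go_acc]
        simp
      · simp only [PySem.Chars.split₀.go, hs]
        exact ih (c :: cur) (by simp)

-- ----- the state machine computes the joined translation -----

theorem smRef_main (cs : List Char) :
    (∀ cur, cur ≠ [] →
        tw cur.reverse ++ smRef cs false true = jn (PySem.Chars.split₀.go cs cur [])) ∧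
    (smRef cs true true =
        if PySem.Chars.split₀.go cs [] [] = [] then []
        else blankMark.toList ++ jn (PySem.Chars.split₀.go cs [] [])) := by
  induction cs with
  | nil =>
      constructor
      · intro cur h
        have hne : cur.isEmpty = false := by simpa [List.isEmpty_iff] using h
        simp [smRef, PySem.Chars.split₀.go, hne, jn, PySem.Chars.join_singleton]
      · simp [smRef, PySem.Chars.split₀.go, jn, PySem.Chars.join_nil]
  | cons c rest ih =>
      obtain ⟨ih2, ih3⟩ := ih
      by_cases hs : PySem.Chars.isspace c = true
      · constructor
        · intro cur h
          have hne : cur.isEmpty = false := by simpa [List.isEmpty_iff] using h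
          simp only [smRef, hs, if_true, PySem.Chars.split₀.go, hne, Bool.false_eq_true,
            if_false]
          rw [go_acc rest [] [cur.reverse], ih3]
          by_cases hz : PySem.Chars.split₀.go rest [] [] = []
          · simp [hz, jn, PySem.Chars.join_singleton]
          · obtain ⟨q, r, hqr⟩ := List.exists_cons_of_ne_nil hz
            simp [hqr, jn, PySem.Chars.join_cons_cons]
        · simp only [smRef, hs, if_true, PySem.Chars.split₀.go, List.isEmpty_nil]
          exact ih3
      · constructor
        · intro cur h
          simp only [smRef, hs, Bool.false_eq_true, if_false, PySem.Chars.split₀.go]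
          rw [← ih2 (c :: cur) (by simp)]
          simp [tw]
        · simp only [smRef, hs, Bool.false_eq_true, if_false, PySem.Chars.split₀.go,
            List.isEmpty_nil]
          rw [← ih2 [c] (by simp)]
          have hnn := go_ne_nil rest [c] (by simp)
          simp [hnn, tw]

theorem smRef_initial (cs : List Char) :
    smRef cs false false = jn (PySem.Chars.split₀ cs) := by
  show smRef cs false false = jn (PySem.Chars.split₀.go cs [] [])
  induction cs with
  | nil => simp [smRef, PySem.Chars.split₀.go, jn, PySem.Chars.join_nil]
  | cons c rest ih =>
      by_cases hs : PySem.Chars.isspace c = true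
      · simp only [smRef, hs, if_true, PySem.Chars.split₀.go, List.isEmpty_nil]
        exact ih
      · simp only [smRef, hs, Bool.false_eq_true, if_false, PySem.Chars.split₀.go,
          List.isEmpty_nil]
        rw [← (smRef_main rest).1 [c] (by simp)]
        simp [tw]

-- ----- B's fold realises smRef -----

theorem foldB_eq (cs : List Char) : ∀ (out : List String) (p st : Bool),
    ((cs.foldl stepB (out, p, st)).1.map String.toList).flatten
      = (out.map String.toList).flatten ++ smRef cs p st := by
  induction cs with
  | nil => simp [smRef]
  | cons c rest ih =>
      intro out p st
      by_cases hs : PySem.Chars.isspace c = true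
      · simp only [List.foldl_cons, stepB, hs, if_true, ih, smRef]
      · simp only [List.foldl_cons, stepB, hs, Bool.false_eq_true, if_false, smRef]
        cases hm : brailleMap (PySem.Chars.lowerChar c) with
        | none =>
            simp only [ih]
            unfold wc
            cases hp : p <;> simp [hm]
        | some code =>
            simp only [ih]
            unfold wc
            cases hp : p <;> cases hu : PySem.Chars.isupper c <;> simp [hm]

-- ----- A's outer loop produces the joined translation -----

theorem foldA_outer (n : Nat) (ws : List String) : ∀ (c : Nat) (fs : String),
    1 ≤ c → c + ws.length = n + 1 →
    ((ws.foldl (stepWordA n) (c, fs)).2).toList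
      = fs.toList ++ jn (ws.map String.toList) := by
  induction ws with
  | nil =>
      intro c fs _ _
      simp [jn, PySem.Chars.join_nil]
  | cons w ws ih =>
      intro c fs hc hn
      cases ws with
      | nil =>
          have hcn : c = n := by simpa using hn
          simp only [List.foldl_cons, List.foldl_nil, List.map_cons, List.map_nil,
            jn, PySem.Chars.join_singleton, stepWordA, hcn]
          simp [foldA_inner]
      | cons w2 ws' =>
          have hlt : c < n := by simp at hn; omega
          have hn1 : 1 < n := by omega
          have hcond : (decide (n > 1) && c != n) = true := by
            simp [hn1]; omega
          have hstep : stepWordA n (c, fs) w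
              = (c + 1, (w.toList.foldl stepLetterA fs) ++ blankMark) := by
            simp [stepWordA, hcond]
          rw [List.foldl_cons, hstep, ih (c + 1) _ (by omega) (by simp at hn ⊢; omega)]
          simp [foldA_inner, jn, PySem.Chars.join_cons_cons]

-- ===== VERDICT (by name: the statement is the Claim_ definition above) =====
theorem solution_spec : Claim_equal_solution := by
  intro s _
  unfold Spec_solution solution solution_alt
  apply String.ext
  rw [foldA_outer (PySem.Str.split₀ s).length (PySem.Str.split₀ s) 1 "" (le_refl 1)
    (by omega)]
  rw [PySem.Str.toList_join]
  have hB := foldB_eq s.toList [] false false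
  simp only [List.map_nil, List.flatten_nil, List.nil_append] at hB
  rw [show ("" : String).toList = [] from rfl, join_empty_sep, hB, smRef_initial]
  simp [PySem.Str.split₀, List.map_map, Function.comp_def]
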